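-- pv_equiv track=rewrite | github.com/feragesp/curso_python | 03_Tipos_de_datos_complejos/xor.py | xor_manual
-- ===== SOURCE A (Python) =====
-- def xor_manual(a, b):
--     i = 0
--     result_xor = 0
--     while i < 8:
--         bit_a = (a >> i) & 1
--         bit_b = (b >> i) & 1
--
--         xor_bits = (bit_a + bit_b) % 2
--         result_xor |= (xor_bits << i)
--
--         i = i + 1
--
--     return result_xor
-- ===== SOURCE B (Python) =====
-- def xor_manual(a, b):
--     return (a ^ b) & 0xFF
-- ===== Notes on version B (the rewrite author's own statement) =====
-- stated objective: idiomatic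
-- what changed: Replaces the 8-iteration per-bit extract/xor/reassemble loop with the single closed-form expression (a ^ b) & 0xFF.
import Mathlib
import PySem

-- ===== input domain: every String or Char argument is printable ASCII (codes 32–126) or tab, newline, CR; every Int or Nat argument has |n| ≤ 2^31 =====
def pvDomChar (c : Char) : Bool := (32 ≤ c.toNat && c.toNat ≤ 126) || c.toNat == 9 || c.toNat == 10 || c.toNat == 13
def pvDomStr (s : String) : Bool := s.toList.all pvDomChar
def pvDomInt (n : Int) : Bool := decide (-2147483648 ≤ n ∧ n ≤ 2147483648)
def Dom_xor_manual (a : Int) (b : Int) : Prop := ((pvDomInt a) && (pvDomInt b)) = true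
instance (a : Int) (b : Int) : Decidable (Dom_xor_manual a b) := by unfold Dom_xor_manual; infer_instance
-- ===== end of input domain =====

-- B replaces A's 8-iteration per-bit extract/xor/reassemble loop with the closed form (a ^ b) & 0xFF (idiomatic, constant-factor faster).

-- ===== PORT A =====
-- while i < 8: extract bit i of a and b, xor them via (+) % 2, or the shifted bit into result_xor
def xor_manual (a : Int) (b : Int) : Int :=
  (List.range 8).foldl
    (fun (result_xor : Int) (i : Nat) =>
      let bit_a := PySem.Int.band (a >>> i) 1          -- (a >> i) & 1
      let bit_b := PySem.Int.band (b >>> i) 1          -- (b >> i) & 1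
      let xor_bits := PySem.Int.mod (bit_a + bit_b) 2  -- (bit_a + bit_b) % 2
      PySem.Int.bor result_xor (xor_bits <<< i))       -- result_xor |= xor_bits << i
    0

-- ===== PORT B =====
def xor_manual_alt (a : Int) (b : Int) : Int :=
  PySem.Int.band (PySem.Int.bxor a b) 255              -- (a ^ b) & 0xFF

-- ===== PRECONDITION & SPEC =====
def Spec_xor_manual (a : Int) (b : Int) (out : Int) : Prop := out = xor_manual_alt a b
instance (a : Int) (b : Int) (out : Int) : Decidable (Spec_xor_manual a b out) := by unfold Spec_xor_manual; infer_instance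

-- ===== CLAIM (what is proved, stated in full; the proofs are below) =====
def Claim_equal_xor_manual : Prop := ∀ (a : Int) (b : Int), Dom_xor_manual a b → Spec_xor_manual a b (xor_manual a b)

-- ===== LEMMAS AND PROOFS =====

-- Nat: right shift distributes over xor (bitwise ext)
theorem natShiftRight_xor (m n i : ℕ) : (m ^^^ n) >>> i = (m >>> i) ^^^ (n >>> i) := by
  apply Nat.eq_of_testBit_eq
  intro j
  simp [Nat.testBit_shiftRight, Nat.testBit_xor]

-- Nat: oring a fresh top bit onto a smaller number is addition
theorem natOr_two_pow (k : ℕ) : ∀ m : ℕ, m < 2 ^ k → m ||| 2 ^ k = m + 2 ^ k := by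
  induction k with
  | zero =>
    intro m hm
    interval_cases m
    decide
  | succ k ih =>
    intro m hm
    have hbit : Nat.bit (m.testBit 0) (m / 2) = m := by
      rw [Nat.bit_val]
      rcases Nat.mod_two_eq_zero_or_one m with h | h <;> simp [Nat.testBit_zero, h] <;> omega
    have hpow : (2 : ℕ) ^ (k + 1) = Nat.bit false (2 ^ k) := by
      simp [Nat.bit_val]; ring
    have hdiv : m / 2 < 2 ^ k := by
      have : (2:ℕ) ^ (k+1) = 2 * 2 ^ k := by ring
      omega
    rw [← hbit, hpow, Nat.lor_bit, ih _ hdiv]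
    rcases Nat.mod_two_eq_zero_or_one m with h | h <;>
      simp [Nat.bit_val, Nat.testBit_zero, h] <;> omega

-- Python & 0xFF is emod 256
theorem band_255_eq_emod (x : ℤ) : PySem.Int.band x 255 = x % 256 := by
  unfold PySem.Int.band
  by_cases hx : 0 ≤ x
  · have h255 : (255 : ℤ).toNat = 255 := rfl
    have hand : x.toNat &&& 255 = x.toNat % 256 :=
      Nat.and_two_pow_sub_one_eq_mod x.toNat 8
    simp only [hx, if_true, if_pos (by norm_num : (0:ℤ) ≤ 255), h255, hand]
    omega
  · have h255 : (255 : ℤ).toNat = 255 := rfl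
    have hand : 255 &&& (-x - 1).toNat = (-x - 1).toNat % 256 := by
      rw [Nat.land_comm]
      exact Nat.and_two_pow_sub_one_eq_mod (-x - 1).toNat 8
    simp only [hx, if_false, if_pos (by norm_num : (0:ℤ) ≤ 255), h255, hand]
    have hm : (-x - 1).toNat % 256 < 256 := Nat.mod_lt _ (by norm_num)
    omega

-- Python x % 2 (PySem.Int.mod) is Lean's emod for the positive divisor 2
theorem pymod_two (x : ℤ) : PySem.Int.mod x 2 = x % 2 :=
  PySem.Int.mod_eq_emod_of_pos (by norm_num)

-- the low bit of a xor is the sum of the low bits mod 2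
theorem bxor_emod_two (a b : ℤ) : (PySem.Int.bxor a b) % 2 = (a % 2 + b % 2) % 2 := by
  unfold PySem.Int.bxor
  by_cases ha : 0 ≤ a <;> by_cases hb : 0 ≤ b <;>
    simp only [ha, hb, if_true, if_false]
  · have h := Nat.xor_mod_two_eq (m := a.toNat) (n := b.toNat)
    omega
  · have h := Nat.xor_mod_two_eq (m := a.toNat) (n := (-b - 1).toNat)
    omega
  · have h := Nat.xor_mod_two_eq (m := (-a - 1).toNat) (n := b.toNat)
    omega
  · have h := Nat.xor_mod_two_eq (m := (-a - 1).toNat) (n := (-b - 1).toNat)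
    omega

-- core >>> on a natCast / on -↑n-1 (Int.negSucc n), computed
theorem shiftRight_natCast' (n i : ℕ) : ((n : ℤ)) >>> i = ((n >>> i : ℕ) : ℤ) := rfl

theorem shiftRight_negForm (n i : ℕ) : (-(n:ℤ) - 1) >>> i = -((n >>> i : ℕ) : ℤ) - 1 := by
  have h1 : -(n:ℤ) - 1 = Int.negSucc n := by rw [Int.negSucc_eq]; ring
  have h2 : -((n >>> i : ℕ) : ℤ) - 1 = Int.negSucc (n >>> i) := by rw [Int.negSucc_eq]; ring
  rw [h1, h2]
  rfl

-- right shift distributes over Python xor (Int level)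
theorem bxor_shiftRight (a b : ℤ) (i : ℕ) :
    (PySem.Int.bxor a b) >>> i = PySem.Int.bxor (a >>> i) (b >>> i) := by
  by_cases ha : 0 ≤ a <;> by_cases hb : 0 ≤ b
  · obtain ⟨m, rfl⟩ := Int.eq_ofNat_of_zero_le ha
    obtain ⟨n, rfl⟩ := Int.eq_ofNat_of_zero_le hb
    unfold PySem.Int.bxor
    simp only [ha, hb, if_true, shiftRight_natCast',
      Int.toNat_natCast]
    rw [if_pos (by positivity : (0:ℤ) ≤ ((n >>> i : ℕ) : ℤ)), natShiftRight_xor,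
      if_pos (by positivity : (0:ℤ) ≤ ((m >>> i : ℕ) : ℤ))]
  · obtain ⟨m, rfl⟩ := Int.eq_ofNat_of_zero_le ha
    obtain ⟨n, rfl⟩ : ∃ n : ℕ, b = -(n:ℤ) - 1 := ⟨(-b - 1).toNat, by omega⟩
    unfold PySem.Int.bxor
    have hb1 : ¬ (0:ℤ) ≤ -(n:ℤ) - 1 := by omega
    have hb2 : ¬ (0:ℤ) ≤ -((n >>> i : ℕ) : ℤ) - 1 := by
      have : (0:ℤ) ≤ ((n >>> i : ℕ) : ℤ) := by positivity
      omega
    have e1 : (-(-(n:ℤ) - 1) - 1).toNat = n := by omega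
    have e2 : (-(-((n >>> i : ℕ) : ℤ) - 1) - 1).toNat = n >>> i := by omega
    simp only [ha, hb1, hb2, if_true, if_false, shiftRight_natCast', shiftRight_negForm,
      Int.toNat_natCast, e1, e2]
    rw [if_pos (by positivity : (0:ℤ) ≤ ((m >>> i : ℕ) : ℤ)), natShiftRight_xor]
  · obtain ⟨n, rfl⟩ := Int.eq_ofNat_of_zero_le hb
    obtain ⟨m, rfl⟩ : ∃ m : ℕ, a = -(m:ℤ) - 1 := ⟨(-a - 1).toNat, by omega⟩
    unfold PySem.Int.bxor
    have ha1 : ¬ (0:ℤ) ≤ -(m:ℤ) - 1 := by omega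
    have ha2 : ¬ (0:ℤ) ≤ -((m >>> i : ℕ) : ℤ) - 1 := by
      have : (0:ℤ) ≤ ((m >>> i : ℕ) : ℤ) := by positivity
      omega
    have e1 : (-(-(m:ℤ) - 1) - 1).toNat = m := by omega
    have e2 : (-(-((m >>> i : ℕ) : ℤ) - 1) - 1).toNat = m >>> i := by omega
    simp only [hb, ha1, ha2, if_true, if_false, shiftRight_natCast', shiftRight_negForm,
      Int.toNat_natCast, e1, e2]
    rw [if_pos (by positivity : (0:ℤ) ≤ ((n >>> i : ℕ) : ℤ)), natShiftRight_xor]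
  · obtain ⟨m, rfl⟩ : ∃ m : ℕ, a = -(m:ℤ) - 1 := ⟨(-a - 1).toNat, by omega⟩
    obtain ⟨n, rfl⟩ : ∃ n : ℕ, b = -(n:ℤ) - 1 := ⟨(-b - 1).toNat, by omega⟩
    unfold PySem.Int.bxor
    have ha1 : ¬ (0:ℤ) ≤ -(m:ℤ) - 1 := by omega
    have hb1 : ¬ (0:ℤ) ≤ -(n:ℤ) - 1 := by omega
    have ha2 : ¬ (0:ℤ) ≤ -((m >>> i : ℕ) : ℤ) - 1 := by
      have : (0:ℤ) ≤ ((m >>> i : ℕ) : ℤ) := by positivity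
      omega
    have hb2 : ¬ (0:ℤ) ≤ -((n >>> i : ℕ) : ℤ) - 1 := by
      have : (0:ℤ) ≤ ((n >>> i : ℕ) : ℤ) := by positivity
      omega
    have e1 : (-(-(m:ℤ) - 1) - 1).toNat = m := by omega
    have e2 : (-(-(n:ℤ) - 1) - 1).toNat = n := by omega
    have e3 : (-(-((m >>> i : ℕ) : ℤ) - 1) - 1).toNat = m >>> i := by omega
    have e4 : (-(-((n >>> i : ℕ) : ℤ) - 1) - 1).toNat = n >>> i := by omega
    simp only [ha1, hb1, ha2, hb2, if_false, shiftRight_negForm, e1, e2, e3, e4,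
      shiftRight_natCast', natShiftRight_xor]

-- peeling the next binary digit: c mod 2^(k+1) from c mod 2^k
theorem emod_two_pow_succ (c : ℤ) (k : ℕ) :
    c % 2 ^ (k + 1) = c % 2 ^ k + 2 ^ k * ((c / 2 ^ k) % 2) := by
  have hP : (0:ℤ) < 2 ^ k := by positivity
  have h1 : c = 2 ^ k * (c / 2 ^ k) + c % 2 ^ k := by
    have := Int.mul_ediv_add_emod c (2 ^ k)
    omega
  have h2 : c / 2 ^ k = 2 * (c / 2 ^ k / 2) + (c / 2 ^ k) % 2 := by omega
  have hr1 : 0 ≤ c % 2 ^ k := Int.emod_nonneg c (by positivity)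
  have hr2 : c % 2 ^ k < 2 ^ k := Int.emod_lt_of_pos c hP
  have hpow : (2:ℤ) ^ (k + 1) = 2 ^ k * 2 := by ring
  calc c % 2 ^ (k + 1)
      = (c % 2 ^ k + 2 ^ k * ((c / 2 ^ k) % 2) + 2 ^ (k+1) * (c / 2 ^ k / 2)) % 2 ^ (k + 1) := by
        congr 1
        rw [hpow]
        nlinarith [h1, h2]
    _ = (c % 2 ^ k + 2 ^ k * ((c / 2 ^ k) % 2)) % 2 ^ (k + 1) := Int.add_mul_emod_self_left _ _ _
    _ = c % 2 ^ k + 2 ^ k * ((c / 2 ^ k) % 2) := by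
        apply Int.emod_eq_of_lt
        · have : 0 ≤ (c / 2 ^ k) % 2 := Int.emod_nonneg _ (by norm_num)
          nlinarith
        · have h3 : (c / 2 ^ k) % 2 < 2 := Int.emod_lt_of_pos _ (by norm_num)
          have h4 : 0 ≤ (c / 2 ^ k) % 2 := Int.emod_nonneg _ (by norm_num)
          rw [hpow]; nlinarith

-- oring a fresh bit at position k onto a value below 2^k is addition (Int level)
theorem bor_fresh_bit (r t : ℤ) (k : ℕ) (hr0 : 0 ≤ r) (hrk : r < 2 ^ k)
    (ht : t = 0 ∨ t = 1) : PySem.Int.bor r (t * 2 ^ k) = r + t * 2 ^ k := by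
  rcases ht with ht | ht
  · subst ht; simp
  · subst ht
    obtain ⟨m, rfl⟩ := Int.eq_ofNat_of_zero_le hr0
    have hlt : m < 2 ^ k := by exact_mod_cast hrk
    have h : (1:ℤ) * 2 ^ k = ((2 ^ k : ℕ) : ℤ) := by push_cast; ring
    rw [h, PySem.Int.bor_natCast, natOr_two_pow k m hlt]
    push_cast; ring

-- the loop invariant: after k iterations the accumulator is (a ^ b) mod 2^k
theorem loop_invariant (a b : ℤ) : ∀ k : ℕ,
    (List.range k).foldl
      (fun (result_xor : Int) (i : Nat) =>
        PySem.Int.bor result_xor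
          ((PySem.Int.mod (PySem.Int.band (a >>> i) 1 + PySem.Int.band (b >>> i) 1) 2) <<< i))
      0 = (PySem.Int.bxor a b) % 2 ^ k := by
  intro k
  induction k with
  | zero => simp
  | succ k ih =>
    rw [List.range_succ, List.foldl_append, List.foldl_cons, List.foldl_nil, ih]
    have hbit : PySem.Int.mod (PySem.Int.band (a >>> k) 1 + PySem.Int.band (b >>> k) 1) 2
        = (PySem.Int.bxor a b / 2 ^ k) % 2 := by
      rw [PySem.Int.band_one, PySem.Int.band_one, pymod_two, pymod_two, pymod_two]
      have h1 : ((a >>> k) % 2 + (b >>> k) % 2) % 2 = (PySem.Int.bxor (a >>> k) (b >>> k)) % 2 :=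
        (bxor_emod_two _ _).symm
      rw [h1, ← bxor_shiftRight, Int.shiftRight_eq_div_pow]
      push_cast
      ring_nf
    have hr0 : 0 ≤ PySem.Int.bxor a b % 2 ^ k := Int.emod_nonneg _ (by positivity)
    have hrk : PySem.Int.bxor a b % 2 ^ k < 2 ^ k := Int.emod_lt_of_pos _ (by positivity)
    have ht : (PySem.Int.bxor a b / 2 ^ k) % 2 = 0 ∨ (PySem.Int.bxor a b / 2 ^ k) % 2 = 1 := by
      omega
    rw [hbit, Int.shiftLeft_eq, bor_fresh_bit _ _ k hr0 hrk ht, emod_two_pow_succ]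
    ring

-- ===== VERDICT (by name: the statement is the Claim_ definition above) =====
theorem xor_manual_spec : Claim_equal_xor_manual := by
  intro a b _
  unfold Spec_xor_manual xor_manual xor_manual_alt
  rw [band_255_eq_emod]
  exact loop_invariant a b 8
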